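-- pv_equiv track=rewrite | github.com/jasper-gis/i3s-slpk-inspector | slpk_diagnoser/engine.py | _preferred_json_resources
-- ===== SOURCE A (Python) =====
-- def _is_json_resource(logical_path: str) -> bool:
--     lowered = logical_path.lower()
--     return lowered.endswith(".json") or lowered.endswith(".json.gz")
--
-- def _canonical_json_resource(logical_path: str) -> str:
--     if logical_path.lower().endswith(".json.gz"):
--         return logical_path[:-3]
--     return logical_path
--
-- def _preferred_json_resources(logical_paths: list[str]) -> list[str]:
--     selected: dict[str, str] = {}
--     for logical in sorted(logical_paths):
--         if not _is_json_resource(logical):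
--             continue
--         canonical = _canonical_json_resource(logical)
--         key = canonical.lower()
--         current = selected.get(key)
--         if current is None or (
--             logical.lower().endswith(".json.gz") and not current.lower().endswith(".json.gz")
--         ):
--             selected[key] = logical
--     return [selected[key] for key in sorted(selected)]
-- ===== SOURCE B (Python) =====
-- def _is_json_resource(logical_path: str) -> bool:
--     lowered = logical_path.lower()
--     return lowered.endswith(".json") or lowered.endswith(".json.gz")
--
-- def _canonical_json_resource(logical_path: str) -> str:
--     if logical_path.lower().endswith(".json.gz"):
--         return logical_path[:-3]
--     return logical_path
--
-- def _winner(candidates: list[str]) -> str: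
--     gz = [p for p in candidates if p.lower().endswith(".json.gz")]
--     return min(gz or candidates)
--
-- def _preferred_json_resources(logical_paths: list[str]) -> list[str]:
--     groups: dict[str, list[str]] = {}
--     for p in logical_paths:
--         if _is_json_resource(p):
--             groups.setdefault(_canonical_json_resource(p).lower(), []).append(p)
--     return [_winner(groups[key]) for key in sorted(groups)]
-- ===== Notes on version B (the rewrite author's own statement) =====
-- stated objective: simpler
-- what changed: Replaces A's streaming conditional-update selection (iterate the sorted input, overwrite a dict entry only when a gz variant beats a non-gz one) with a group-then-reduce decomposition: group the json paths by canonical lowercased key, then pick each group's winner with min(gz_variants or group).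
import Mathlib
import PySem

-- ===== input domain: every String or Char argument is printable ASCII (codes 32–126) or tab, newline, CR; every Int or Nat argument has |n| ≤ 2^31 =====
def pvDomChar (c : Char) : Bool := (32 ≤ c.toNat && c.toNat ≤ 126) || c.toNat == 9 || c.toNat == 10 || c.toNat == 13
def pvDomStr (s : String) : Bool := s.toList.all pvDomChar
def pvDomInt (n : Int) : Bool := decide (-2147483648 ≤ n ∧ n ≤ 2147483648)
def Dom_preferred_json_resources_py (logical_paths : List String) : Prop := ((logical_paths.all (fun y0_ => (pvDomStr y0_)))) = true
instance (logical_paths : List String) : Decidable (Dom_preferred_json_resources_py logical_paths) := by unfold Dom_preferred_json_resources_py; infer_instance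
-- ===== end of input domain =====

-- B replaces A's streaming conditional-update selection over the sorted input with a
-- group-then-reduce decomposition (group json paths by canonical key, pick each group's
-- winner with min); objective: simpler.

-- ===== PORT A =====
-- module helper _is_json_resource
def pvIsJson (logical_path : String) : Bool :=
  let lowered := PySem.Str.lower logical_path
  PySem.Str.endswith lowered ".json" || PySem.Str.endswith lowered ".json.gz"

-- module helper _canonical_json_resource (logical_path[:-3] is Str.slice to -3)
def pvCanonical (logical_path : String) : String :=
  if PySem.Str.endswith (PySem.Str.lower logical_path) ".json.gz" then
    PySem.Str.slice logical_path none (some (-3))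
  else logical_path

-- 'p.lower().endswith(".json.gz")' as it appears inline in both programs
def pvIsGz (p : String) : Bool := PySem.Str.endswith (PySem.Str.lower p) ".json.gz"

-- 'canonical.lower()' — the dict key both programs use
def pvKey (p : String) : String := PySem.Str.lower (pvCanonical p)

-- A's loop body
def pvStepA (selected : PySem.Dict String String) (logical : String) : PySem.Dict String String :=
  if !(pvIsJson logical) then selected
  else
    let key := pvKey logical
    match selected.get? key with
    | none => selected.insert key logical
    | some current =>
        if pvIsGz logical && !(pvIsGz current) then selected.insert key logical else selected

def preferred_json_resources_py (logical_paths : List String) : List String :=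
  let selected := (PySem.List.sorted logical_paths (fun x => x) false).foldl pvStepA PySem.Dict.empty
  -- selected[key]: the key is always present here, so getD "" is Python's selected[key]
  (PySem.List.sorted selected.keys (fun x => x) false).map (fun key => selected.getD key "")

-- ===== PORT B =====
-- B's grouping loop body: groups.setdefault(key, []).append(p)
def pvGroupStep (groups : PySem.Dict String (List String)) (p : String) : PySem.Dict String (List String) :=
  if pvIsJson p then groups.modify (pvKey p) [] (fun l => l ++ [p]) else groups

-- B's helper _winner: min(gz or candidates); candidates is never empty here, so getD "" is Python's min
def pvWinner (candidates : List String) : String :=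
  let gz := candidates.filter pvIsGz
  (PySem.List.min? (if gz.isEmpty then candidates else gz) (fun x => x)).getD ""

def preferred_json_resources_py_alt (logical_paths : List String) : List String :=
  let groups := logical_paths.foldl pvGroupStep PySem.Dict.empty
  (PySem.List.sorted groups.keys (fun x => x) false).map (fun key => pvWinner (groups.getD key []))

-- ===== PRECONDITION & SPEC =====
def Spec_preferred_json_resources_py (logical_paths : List String) (out : List String) : Prop := out = preferred_json_resources_py_alt logical_paths
instance (logical_paths : List String) (out : List String) : Decidable (Spec_preferred_json_resources_py logical_paths out) := by unfold Spec_preferred_json_resources_py; infer_instance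

-- ===== CLAIM (what is proved, stated in full; the proofs are below) =====
def Claim_equal_preferred_json_resources_py : Prop := ∀ (logical_paths : List String), Dom_preferred_json_resources_py logical_paths → Spec_preferred_json_resources_py logical_paths (preferred_json_resources_py logical_paths)

-- ===== LEMMAS AND PROOFS =====

-- the per-key effect of A's loop body
def pvUpd (cur : Option String) (x : String) : Option String :=
  match cur with
  | none => some x
  | some c => if pvIsGz x && !(pvIsGz c) then some x else some c

-- A's loop body on an already-json element
def pvIns (d : PySem.Dict String String) (x : String) : PySem.Dict String String :=
  match d.get? (pvKey x) with
  | none => d.insert (pvKey x) x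
  | some current => if pvIsGz x && !(pvIsGz current) then d.insert (pvKey x) x else d

lemma pvfoldA (l : List String) (d : PySem.Dict String String) :
    l.foldl pvStepA d = (l.filter pvIsJson).foldl pvIns d := by
  rw [← PySem.List.foldl_if_eq_foldl_filter]
  apply PySem.List.foldl_congr_mem
  intro acc x _
  by_cases h : pvIsJson x = true <;> simp [pvStepA, pvIns, h]

lemma pvfoldB (l : List String) (d : PySem.Dict String (List String)) :
    l.foldl pvGroupStep d
      = (l.filter pvIsJson).foldl (fun d p => d.modify (pvKey p) [] (fun g => g ++ [p])) d := by
  rw [← PySem.List.foldl_if_eq_foldl_filter]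
  apply PySem.List.foldl_congr_mem
  intro acc x _
  simp [pvGroupStep]

lemma pvget_pvIns (d : PySem.Dict String String) (x : String) (k : String) :
    (pvIns d x).get? k = if pvKey x = k then pvUpd (d.get? k) x else d.get? k := by
  unfold pvIns pvUpd
  by_cases hk : pvKey x = k
  · subst hk
    cases h : d.get? (pvKey x) with
    | none => simp [PySem.Dict.get?_insert]
    | some c =>
      by_cases hx : pvIsGz x = true <;> by_cases hc : pvIsGz c = true <;>
        simp [hx, hc, PySem.Dict.get?_insert, h]
  · cases h : d.get? (pvKey x) with
    | none =>
      simp [PySem.Dict.get?_insert, Ne.symm hk] <;> intro hkk <;> exact absurd hkk hk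
    | some c =>
      by_cases hx : pvIsGz x = true <;> by_cases hc : pvIsGz c = true <;>
        simp [hx, hc, PySem.Dict.get?_insert, Ne.symm hk] <;>
        intro hkk <;> exact absurd hkk hk

lemma pvgetA (S : List String) : ∀ (d : PySem.Dict String String) (k : String),
    (S.foldl pvIns d).get? k
      = (S.filter (fun x => pvKey x == k)).foldl pvUpd (d.get? k) := by
  induction S with
  | nil => intro d k; rfl
  | cons x t ih =>
    intro d k
    by_cases h : pvKey x = k
    · rw [List.filter_cons_of_pos (by simp [h]), List.foldl_cons, List.foldl_cons,
        ih, pvget_pvIns, if_pos h]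
    · rw [List.filter_cons_of_neg (by simp [h]), List.foldl_cons, ih, pvget_pvIns, if_neg h]

lemma pvupd_gz (g : List String) (c : String) (h : pvIsGz c = true) :
    g.foldl pvUpd (some c) = some c := by
  induction g with
  | nil => rfl
  | cons x t ih => simp only [List.foldl_cons, pvUpd, h, Bool.not_true, Bool.and_false]; exact ih

lemma pvupd_notgz (g : List String) : ∀ c : String, pvIsGz c = false →
    g.foldl pvUpd (some c) = some ((g.filter pvIsGz).headD c) := by
  induction g with
  | nil => intro c h; rfl
  | cons x t ih =>
    intro c h
    simp only [List.foldl_cons, List.filter_cons]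
    cases hx : pvIsGz x with
    | true =>
      have h1 : pvUpd (some c) x = some x := by simp [pvUpd, hx, h]
      rw [h1, pvupd_gz t x hx]; simp [hx]
    | false =>
      have h1 : pvUpd (some c) x = some c := by simp [pvUpd, hx]
      rw [h1, ih c h]; simp [hx]

lemma pvupd_none (h : String) (t : List String) :
    (h :: t).foldl pvUpd none = some (((h :: t).filter pvIsGz).headD h) := by
  simp only [List.foldl_cons, List.filter_cons]
  show t.foldl pvUpd (some h) = _
  cases hh : pvIsGz h with
  | true => rw [pvupd_gz t h hh]; simp [hh]
  | false => rw [pvupd_notgz t h hh]; simp [hh]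

lemma pvkeys_pvIns (d : PySem.Dict String String) (x : String) :
    (pvIns d x).keys = PySem.Set.add d.keys (pvKey x) := by
  unfold pvIns
  cases h : d.get? (pvKey x) with
  | none =>
    have hc : d.contains (pvKey x) = false := (PySem.Dict.get?_eq_none_iff_contains d _).mp h
    have hm : pvKey x ∉ d.keys := by
      intro hm
      rw [(PySem.Dict.contains_iff_mem_keys d _).mpr hm] at hc
      cases hc
    rw [PySem.Dict.keys_insert_of_not_contains d x hc, PySem.Set.add_of_not_mem hm]
  | some c =>
    have hc : d.contains (pvKey x) = true := by
      cases hcc : d.contains (pvKey x) with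
      | false => rw [(PySem.Dict.get?_eq_none_iff_contains d _).mpr hcc] at h; cases h
      | true => rfl
    have hm : pvKey x ∈ d.keys := (PySem.Dict.contains_iff_mem_keys d _).mp hc
    dsimp only
    by_cases hcond : (pvIsGz x && !(pvIsGz c)) = true
    · rw [if_pos hcond, PySem.Dict.keys_insert_of_contains d x hc, PySem.Set.add_of_mem hm]
    · rw [if_neg hcond, PySem.Set.add_of_mem hm]

lemma pvkeysA (S : List String) : ∀ d : PySem.Dict String String,
    (S.foldl pvIns d).keys = PySem.Set.update d.keys (S.map pvKey) := by
  induction S with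
  | nil => intro d; simp [PySem.Set.update_nil]
  | cons x t ih =>
    intro d
    rw [List.foldl_cons, ih, List.map_cons, PySem.Set.update_cons, pvkeys_pvIns]

lemma pvsorted_filter (p : String → Bool) (l : List String) :
    (PySem.List.sorted l (fun x => x) false).filter p
      = PySem.List.sorted (l.filter p) (fun x => x) false := by
  symm
  apply PySem.List.sorted_id_eq_of_perm_of_pairwise
  · exact (PySem.List.sorted_perm l (fun x => x) false).filter p
  · exact List.Pairwise.sublist List.filter_sublist (PySem.List.sorted_pairwise l (fun x => x))

lemma pvminD (l : List String) (hl : l ≠ []) (df : String) :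
    (PySem.List.min? l (fun x => x)).getD df
      = (PySem.List.sorted l (fun x => x) false).headD df := by
  cases hs : PySem.List.sorted l (fun x => x) false with
  | nil => exact absurd ((PySem.List.sorted_eq_nil_iff l _ false).mp hs) hl
  | cons m t =>
    cases hm : PySem.List.min? l (fun x => x) with
    | none => exact absurd ((PySem.List.min?_eq_none_iff l _).mp hm) hl
    | some v =>
      have hvl : v ∈ l := PySem.List.min?_mem hm
      have hml : m ∈ l := by
        have : m ∈ PySem.List.sorted l (fun x => x) false := by rw [hs]; exact List.mem_cons_self
        exact (PySem.List.mem_sorted l _ false m).mp this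
      have h1 : m ≤ v := PySem.List.key_head_sorted_le l (fun x => x) hs v hvl
      have h2 : v ≤ m := PySem.List.min?_isMin hm m hml
      simp [le_antisymm h2 h1]

lemma pvwinner_eq (g' : List String) (h' : g' ≠ []) :
    ((PySem.List.sorted g' (fun x => x) false).filter pvIsGz).headD
        ((PySem.List.sorted g' (fun x => x) false).headD "")
      = pvWinner g' := by
  unfold pvWinner
  rw [pvsorted_filter]
  cases hgz : g'.filter pvIsGz with
  | nil =>
    dsimp only
    rw [if_pos (by simp), pvminD g' h' ""]
    have hnil : PySem.List.sorted ([] : List String) (fun x => x) false = [] := rfl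
    rw [hnil]
    simp
  | cons y ys =>
    dsimp only
    have hne : g'.filter pvIsGz ≠ [] := by rw [hgz]; simp
    simp only [List.isEmpty_cons, Bool.false_eq_true, if_false]
    rw [← hgz, pvminD (g'.filter pvIsGz) hne ""]
    cases hs : PySem.List.sorted (g'.filter pvIsGz) (fun x => x) false with
    | nil => exact absurd ((PySem.List.sorted_eq_nil_iff _ _ false).mp hs) hne
    | cons m t => simp

lemma pvgroups_getD (S' : List String) (k : String) :
    (S'.foldl (fun d p => d.modify (pvKey p) [] (fun g => g ++ [p])) PySem.Dict.empty).getD k []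
      = S'.filter (fun x => pvKey x == k) := by
  have h1 : S'.foldl (fun d p => d.modify (pvKey p) [] (fun g => g ++ [p])) PySem.Dict.empty
      = (S'.map (fun p => (pvKey p, p))).foldl
          (fun d q => d.modify q.1 [] (fun g => g ++ [q.2])) PySem.Dict.empty := by
    rw [List.foldl_map]
  rw [h1, PySem.Dict.getD_foldl_modify_append, PySem.Dict.getD_empty]
  rw [List.filter_map]
  simp [Function.comp_def]

theorem pv_main_eq (lps : List String) :
    preferred_json_resources_py lps = preferred_json_resources_py_alt lps := by
  simp only [preferred_json_resources_py, preferred_json_resources_py_alt]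
  have hS : (PySem.List.sorted lps (fun x => x) false).filter pvIsJson
      = PySem.List.sorted (lps.filter pvIsJson) (fun x => x) false := pvsorted_filter _ lps
  have hsel : (PySem.List.sorted lps (fun x => x) false).foldl pvStepA PySem.Dict.empty
      = (PySem.List.sorted (lps.filter pvIsJson) (fun x => x) false).foldl pvIns PySem.Dict.empty := by
    rw [pvfoldA, hS]
  have hgrp : lps.foldl pvGroupStep PySem.Dict.empty
      = (lps.filter pvIsJson).foldl
          (fun d p => d.modify (pvKey p) [] (fun g => g ++ [p])) PySem.Dict.empty := pvfoldB lps _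
  rw [hsel, hgrp]
  have hkA : ((PySem.List.sorted (lps.filter pvIsJson) (fun x => x) false).foldl
        pvIns PySem.Dict.empty).keys
      = PySem.Set.ofList ((PySem.List.sorted (lps.filter pvIsJson) (fun x => x) false).map pvKey) := by
    rw [pvkeysA]
    exact PySem.Set.update_empty _
  have hkB : ((lps.filter pvIsJson).foldl
        (fun d p => d.modify (pvKey p) [] (fun g => g ++ [p])) PySem.Dict.empty).keys
      = PySem.Set.ofList ((lps.filter pvIsJson).map pvKey) := by
    rw [PySem.Dict.keys_foldl_modify_key (lps.filter pvIsJson) pvKey []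
      (fun _ p => fun g => g ++ [p]) PySem.Dict.empty]
    exact PySem.Set.update_empty _
  have hperm : ((PySem.List.sorted (lps.filter pvIsJson) (fun x => x) false).map pvKey).Perm
      ((lps.filter pvIsJson).map pvKey) :=
    (PySem.List.sorted_perm (lps.filter pvIsJson) _ false).map pvKey
  have hpk : (PySem.Set.ofList ((PySem.List.sorted (lps.filter pvIsJson) (fun x => x) false).map pvKey)).Perm
      (PySem.Set.ofList ((lps.filter pvIsJson).map pvKey)) := by
    rw [List.perm_ext_iff_of_nodup (PySem.Set.nodup_ofList _) (PySem.Set.nodup_ofList _)]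
    intro a
    rw [PySem.Set.mem_ofList, PySem.Set.mem_ofList]
    exact hperm.mem_iff
  have hks : PySem.List.sorted
        (PySem.Set.ofList ((PySem.List.sorted (lps.filter pvIsJson) (fun x => x) false).map pvKey))
        (fun x => x) false
      = PySem.List.sorted (PySem.Set.ofList ((lps.filter pvIsJson).map pvKey)) (fun x => x) false :=
    PySem.List.sorted_eq_sorted_of_perm _ _ _ (fun _ _ h => h) hpk
  rw [hkA, hkB, hks]
  apply List.map_congr_left
  intro k hk
  have hkmem : k ∈ (lps.filter pvIsJson).map pvKey := by
    have h1 := (PySem.List.mem_sorted _ _ false k).mp hk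
    exact (PySem.Set.mem_ofList _ k).mp h1
  obtain ⟨x, hxS', hxk⟩ := List.mem_map.mp hkmem
  have hg'ne : (lps.filter pvIsJson).filter (fun y => pvKey y == k) ≠ [] := by
    intro hnil
    have hx : x ∈ (lps.filter pvIsJson).filter (fun y => pvKey y == k) :=
      List.mem_filter.mpr ⟨hxS', by simp [hxk]⟩
    rw [hnil] at hx
    cases hx
  rw [PySem.Dict.getD_eq_get?_getD, pvgetA, PySem.Dict.get?_empty, pvgroups_getD]
  have hSk : (PySem.List.sorted (lps.filter pvIsJson) (fun x => x) false).filter (fun y => pvKey y == k)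
      = PySem.List.sorted ((lps.filter pvIsJson).filter (fun y => pvKey y == k)) (fun x => x) false :=
    pvsorted_filter _ _
  rw [hSk]
  cases hs : PySem.List.sorted ((lps.filter pvIsJson).filter (fun y => pvKey y == k)) (fun x => x) false with
  | nil => exact absurd ((PySem.List.sorted_eq_nil_iff _ _ false).mp hs) hg'ne
  | cons h0 t0 =>
    rw [pvupd_none h0 t0]
    have hw := pvwinner_eq ((lps.filter pvIsJson).filter (fun y => pvKey y == k)) hg'ne
    rw [hs] at hw
    simpa using hw

-- ===== VERDICT (by name: the statement is the Claim_ definition above) =====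
theorem preferred_json_resources_py_spec : Claim_equal_preferred_json_resources_py := by
  intro logical_paths _
  unfold Spec_preferred_json_resources_py
  exact pv_main_eq logical_paths
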